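-- pv_equiv track=rewrite | github.com/ukstevem/step-xcaf-docker | step6_merge_derived.py | _pick_display_name_for_subpart
-- ===== SOURCE A (Python) =====
-- from typing import Any, Dict, List, Optional, Tuple
--
-- def _pick_display_name_for_subpart(
--     sub_sig: str,
--     where_used: List[str],
--     parent_name_by_sig: Dict[str, str],
-- ) -> Tuple[str, str, str]:
--     """
--     Deterministic naming that never concatenates multiple parents.
--
--     - If used under exactly one parent: "<parent_name> / subpart <8>"
--     - If used under multiple parents:  "Subpart <8>"  (stable, parent-independent)
--
--     Still returns representative parent fields for UI context.
--     """
--     where_used_clean = sorted(set(str(x).strip() for x in where_used if str(x).strip()))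
--     rep_parent_sig = where_used_clean[0] if where_used_clean else ""
--     rep_parent_name = parent_name_by_sig.get(rep_parent_sig, "") if rep_parent_sig else ""
--
--     if len(where_used_clean) == 1 and rep_parent_name:
--         disp = f"{rep_parent_name} / subpart {sub_sig[:8]}"
--     else:
--         disp = f"Subpart {sub_sig[:8]}"
--
--     return disp, rep_parent_sig, rep_parent_name
-- ===== SOURCE B (Python) =====
-- def _pick_display_name_for_subpart(sub_sig, where_used, parent_name_by_sig):
--     # One pass: maintain the set of distinct stripped names and a running minimum,
--     # instead of building a sorted list just to take its head and length.
--     seen = set()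
--     best = None
--     for x in where_used:
--         s = str(x).strip()
--         if not s:
--             continue
--         seen.add(s)
--         if best is None or s < best:
--             best = s
--     rep_parent_sig = best if best is not None else ""
--     rep_parent_name = parent_name_by_sig.get(rep_parent_sig, "") if rep_parent_sig else ""
--     if len(seen) == 1 and rep_parent_name:
--         disp = f"{rep_parent_name} / subpart {sub_sig[:8]}"
--     else:
--         disp = f"Subpart {sub_sig[:8]}"
--     return disp, rep_parent_sig, rep_parent_name
-- ===== Notes on version B (the rewrite author's own statement) =====
-- stated objective: alternative
-- what changed: Replaces sorted(set(...)) list construction with a single pass over where_used that maintains a set of distinct stripped names and a running lexicographic minimum; the representative is the running min and the branch test uses the set's size.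
import Mathlib
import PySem

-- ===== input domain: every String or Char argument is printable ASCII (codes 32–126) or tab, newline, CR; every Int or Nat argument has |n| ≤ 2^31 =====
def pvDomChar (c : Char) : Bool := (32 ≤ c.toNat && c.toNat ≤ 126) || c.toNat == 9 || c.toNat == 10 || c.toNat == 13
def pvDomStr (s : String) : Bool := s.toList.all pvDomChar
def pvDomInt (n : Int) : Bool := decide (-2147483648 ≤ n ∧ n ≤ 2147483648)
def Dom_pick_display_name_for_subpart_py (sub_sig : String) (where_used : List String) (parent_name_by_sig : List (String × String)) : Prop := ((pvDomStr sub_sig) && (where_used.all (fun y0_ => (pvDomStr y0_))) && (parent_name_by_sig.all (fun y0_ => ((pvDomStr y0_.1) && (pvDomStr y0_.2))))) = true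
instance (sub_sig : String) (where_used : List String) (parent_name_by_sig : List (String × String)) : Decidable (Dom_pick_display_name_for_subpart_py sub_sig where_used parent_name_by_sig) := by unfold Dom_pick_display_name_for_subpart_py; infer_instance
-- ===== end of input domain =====

-- B replaces A's sorted(set(...)) construction with a single pass keeping the set of distinct stripped names and a running lexicographic minimum (alternative decomposition, same result).
-- ===== PORT A =====
def pick_display_name_for_subpart_py (sub_sig : String) (where_used : List String) (parent_name_by_sig : List (String × String)) : String × String × String :=
  -- sorted(set(str(x).strip() for x in where_used if str(x).strip()))
  let where_used_clean : List String :=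
    PySem.List.sorted (PySem.Set.ofList ((where_used.map PySem.Str.strip).filter (fun s => s ≠ ""))) (fun x => x) false
  let rep_parent_sig := where_used_clean.headD ""
  let rep_parent_name := if rep_parent_sig ≠ "" then PySem.Dict.getD (PySem.Dict.ofList parent_name_by_sig) rep_parent_sig "" else ""
  let disp :=
    if where_used_clean.length = 1 ∧ rep_parent_name ≠ "" then
      rep_parent_name ++ " / subpart " ++ PySem.Str.slice sub_sig none (some 8)
    else
      "Subpart " ++ PySem.Str.slice sub_sig none (some 8)
  (disp, rep_parent_sig, rep_parent_name)

-- ===== PORT B =====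
-- B: one pass over where_used keeping (set of distinct stripped names, running minimum)
def pvStep (st : PySem.Set String × Option String) (x : String) : PySem.Set String × Option String :=
  let s := PySem.Str.strip x
  if s = "" then st
  else (PySem.Set.add st.1 s,
        match st.2 with
        | none => some s
        | some b => if s < b then some s else some b)

def pick_display_name_for_subpart_py_alt (sub_sig : String) (where_used : List String) (parent_name_by_sig : List (String × String)) : String × String × String :=
  let st : PySem.Set String × Option String := where_used.foldl pvStep (PySem.Set.empty, none)
  let rep_parent_sig := st.2.getD ""
  let rep_parent_name := if rep_parent_sig ≠ "" then PySem.Dict.getD (PySem.Dict.ofList parent_name_by_sig) rep_parent_sig "" else ""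
  let disp :=
    if PySem.Set.len st.1 = 1 ∧ rep_parent_name ≠ "" then
      rep_parent_name ++ " / subpart " ++ PySem.Str.slice sub_sig none (some 8)
    else
      "Subpart " ++ PySem.Str.slice sub_sig none (some 8)
  (disp, rep_parent_sig, rep_parent_name)

-- ===== PRECONDITION & SPEC =====
def Spec_pick_display_name_for_subpart_py (sub_sig : String) (where_used : List String) (parent_name_by_sig : List (String × String)) (out : String × String × String) : Prop := out = pick_display_name_for_subpart_py_alt sub_sig where_used parent_name_by_sig
instance (sub_sig : String) (where_used : List String) (parent_name_by_sig : List (String × String)) (out : String × String × String) : Decidable (Spec_pick_display_name_for_subpart_py sub_sig where_used parent_name_by_sig out) := by unfold Spec_pick_display_name_for_subpart_py; infer_instance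

-- ===== CLAIM (what is proved, stated in full; the proofs are below) =====
def Claim_equal_pick_display_name_for_subpart_py : Prop := ∀ (sub_sig : String) (where_used : List String) (parent_name_by_sig : List (String × String)), Dom_pick_display_name_for_subpart_py sub_sig where_used parent_name_by_sig → Spec_pick_display_name_for_subpart_py sub_sig where_used parent_name_by_sig (pick_display_name_for_subpart_py sub_sig where_used parent_name_by_sig)

-- ===== LEMMAS AND PROOFS =====

-- ===== VERDICT (by name: the statement is the Claim_ definition above) =====
-- pvL ws is the stream of stripped non-empty names both ports consume
def pvL (ws : List String) : List String := (ws.map PySem.Str.strip).filter (fun s => s ≠ "")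

def pvMStep (b : Option String) (s : String) : Option String :=
  match b with
  | none => some s
  | some b => if s < b then some s else some b

theorem pvFold_eq (ws : List String) : ∀ st : PySem.Set String × Option String,
    ws.foldl pvStep st = ((pvL ws).foldl PySem.Set.add st.1, (pvL ws).foldl pvMStep st.2) := by
  induction ws with
  | nil => intro st; simp [pvL]
  | cons x t ih =>
    intro st
    by_cases h : PySem.Str.strip x = ""
    · simp only [pvL, List.map_cons, List.filter_cons, h, List.foldl_cons]
      simp only [pvL] at ih
      simp [pvStep, h, ih]
    · simp only [pvL, List.map_cons, List.filter_cons, List.foldl_cons]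
      simp only [pvL] at ih
      simp [pvStep, pvMStep, h, ih]

theorem pvMfold_some (l : List String) : ∀ b : String,
    l.foldl pvMStep (some b) = some (l.foldl min b) := by
  induction l with
  | nil => intro b; rfl
  | cons s t ih =>
    intro b
    simp only [List.foldl_cons, pvMStep]
    by_cases h : s < b
    · rw [if_pos h, ih, min_eq_right h.le]
    · rw [if_neg h, ih, min_eq_left (not_lt.mp h)]

theorem pvRep_eq (ws : List String) :
    (PySem.List.sorted (PySem.Set.ofList (pvL ws)) (fun x => x) false).headD ""
      = ((pvL ws).foldl pvMStep none).getD "" := by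
  by_cases hemp : pvL ws = []
  · rw [hemp]
    rw [show PySem.Set.ofList ([] : List String) = [] from rfl,
        (PySem.List.sorted_eq_nil_iff _ _ _).mpr rfl]
    rfl
  · obtain ⟨a, t, hL⟩ := List.exists_cons_of_ne_nil hemp
    have hset : PySem.Set.ofList (pvL ws) ≠ [] := by
      intro hnil
      have : a ∈ PySem.Set.ofList (pvL ws) := (PySem.Set.mem_ofList _ _).mpr (by simp [hL])
      simp [hnil] at this
    rcases hs : PySem.List.sorted (PySem.Set.ofList (pvL ws)) (fun x => x) false with _ | ⟨m, r⟩
    · exact absurd ((PySem.List.sorted_eq_nil_iff _ _ _).mp hs) hset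
    · have hbest : (pvL ws).foldl pvMStep none = some (t.foldl min a) := by
        rw [hL, List.foldl_cons]
        exact pvMfold_some t a
      have hmmem : m ∈ pvL ws := by
        have : m ∈ PySem.List.sorted (PySem.Set.ofList (pvL ws)) (fun x => x) false := by
          simp [hs]
        exact (PySem.Set.mem_ofList _ _).mp ((PySem.List.mem_sorted _ _ _ _).mp this)
      have hble : ∀ y ∈ pvL ws, t.foldl min a ≤ y := by
        intro y hy
        rw [hL] at hy
        rcases List.mem_cons.mp hy with rfl | hy
        · exact (PySem.List.foldl_min_le t y).1
        · exact (PySem.List.foldl_min_le t a).2 y hy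
      have hbmem : t.foldl min a ∈ pvL ws := by
        rw [hL]
        rcases PySem.List.foldl_min_mem t a with h | h
        · simp [h]
        · exact List.mem_cons_of_mem _ h
      have hmle : ∀ y ∈ pvL ws, m ≤ y := fun y hy =>
        PySem.List.key_head_sorted_le _ _ hs y ((PySem.Set.mem_ofList _ _).mpr hy)
      have hma : m = t.foldl min a := le_antisymm (hmle _ hbmem) (hble _ hmmem)
      rw [hbest]
      simpa using hma

theorem pvLen_eq (ws : List String) :
    ((PySem.List.sorted (PySem.Set.ofList (pvL ws)) (fun x => x) false).length = 1)
      ↔ (PySem.Set.len ((pvL ws).foldl PySem.Set.add PySem.Set.empty) = 1) := by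
  rw [PySem.List.length_sorted,
      show ((pvL ws).foldl PySem.Set.add PySem.Set.empty) = PySem.Set.ofList (pvL ws) from
        (PySem.Set.ofList_eq_foldl _).symm]
  simp [PySem.Set.len]

-- ===== VERDICT (by name: the statement is the Claim_ definition above) =====
theorem pick_display_name_for_subpart_py_spec : Claim_equal_pick_display_name_for_subpart_py := by
  intro sub_sig where_used parent_name_by_sig _hdom
  unfold Spec_pick_display_name_for_subpart_py
  unfold pick_display_name_for_subpart_py pick_display_name_for_subpart_py_alt
  rw [pvFold_eq]
  have hrep := pvRep_eq where_used
  have hlen := pvLen_eq where_used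
  simp only [pvL] at hrep hlen
  simp only [pvL]
  rw [← hrep]
  simp only [hlen]
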